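-- pv_equiv track=rewrite | github.com/I3at57/LapinTaquin | LapinTaquin.py | generate_default_grid
-- ===== SOURCE A (Python) =====
-- def generate_default_grid(size):
--     pool = [i for i in range(size*size)]
--     defaultGrid = []
--
--     for i in range(size):
--         line = []
--         for j in range(size):
--             if len(pool) == 1:
--                 n = pool[0]
--             else:
--                 n = pool[1]
--             line.append(n)
--             pool.remove(n)
--         defaultGrid.append(line)
--
--     return(defaultGrid)
-- ===== SOURCE B (Python) =====
-- def generate_default_grid(size):
--     n = size * size
--     return [[(i * size + j + 1) % n for j in range(size)] for i in range(size)]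
-- ===== Notes on version B (the rewrite author's own statement) =====
-- stated objective: faster
-- what changed: Replaced the pool list with repeated list.remove (quadratic-in-cells scans) by a closed-form direct fill: cell (i,j) holds (i*size+j+1) mod size^2.
import Mathlib
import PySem

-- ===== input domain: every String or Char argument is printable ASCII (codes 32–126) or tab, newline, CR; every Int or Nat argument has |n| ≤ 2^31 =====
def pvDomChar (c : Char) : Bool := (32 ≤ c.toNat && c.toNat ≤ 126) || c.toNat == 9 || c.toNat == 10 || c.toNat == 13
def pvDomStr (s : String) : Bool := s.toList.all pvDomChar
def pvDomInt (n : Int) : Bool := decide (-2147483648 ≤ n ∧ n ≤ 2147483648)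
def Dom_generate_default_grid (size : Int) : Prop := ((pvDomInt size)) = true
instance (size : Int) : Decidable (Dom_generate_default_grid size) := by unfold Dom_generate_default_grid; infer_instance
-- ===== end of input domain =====

-- B replaces A's pool list with repeated list.remove by a closed-form direct fill
-- (cell (i,j) = (i*size+j+1) mod size^2): asymptotically faster, O(size^2) vs O(size^4).


-- ===== PORT A =====
-- one pass of the inner loop body: pick pool[0] if len==1 else pool[1], append, remove
def pvStepA (st : List Int × List Int) : List Int × List Int :=
  let pool := st.1
  let n := if pool.length == 1 then (PySem.List.pyGet? pool 0).getD 0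
           else (PySem.List.pyGet? pool 1).getD 0
  ((PySem.List.remove? pool n).getD pool, st.2 ++ [n])

-- one pass of the outer loop body: run the inner loop, append the finished line
def pvOuterA (size : Int) (st : List Int × List (List Int)) : List Int × List (List Int) :=
  let inner := (PySem.List.pyRange 0 size 1).foldl (fun st2 _ => pvStepA st2) (st.1, [])
  (inner.1, st.2 ++ [inner.2])

def generate_default_grid (size : Int) : List (List Int) :=
  let pool := PySem.List.pyRange 0 (size * size) 1
  ((PySem.List.pyRange 0 size 1).foldl (fun st _ => pvOuterA size st) (pool, [])).2

-- ===== PORT B =====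
def generate_default_grid_alt (size : Int) : List (List Int) :=
  let n := size * size
  (PySem.List.pyRange 0 size 1).map (fun i =>
    (PySem.List.pyRange 0 size 1).map (fun j => PySem.Int.mod (i * size + j + 1) n))

-- ===== PRECONDITION & SPEC =====
def Spec_generate_default_grid (size : Int) (out : List (List Int)) : Prop := out = generate_default_grid_alt size
instance (size : Int) (out : List (List Int)) : Decidable (Spec_generate_default_grid size out) := by unfold Spec_generate_default_grid; infer_instance

-- ===== CLAIM (what is proved, stated in full; the proofs are below) =====
def Claim_equal_generate_default_grid : Prop := ∀ (size : Int), Dom_generate_default_grid size → Spec_generate_default_grid size (generate_default_grid size)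

-- ===== LEMMAS AND PROOFS =====

-- a constant-body foldl is an iterate
theorem pv_foldl_const {α β : Type} (f : β → β) (l : List α) (init : β) :
    l.foldl (fun s _ => f s) init = f^[l.length] init := by
  induction l generalizing init with
  | nil => rfl
  | cons x xs ih => simp [List.foldl, ih, Function.iterate_succ_apply]

-- one A-step on pool 0 :: a :: rest (0 < a): takes a
theorem pvStepA_mid (a b : Int) (h0 : 0 < a) (hab : a < b) (acc : List Int) :
    pvStepA (0 :: PySem.List.pyRange a b 1, acc)
      = (0 :: PySem.List.pyRange (a + 1) b 1, acc ++ [a]) := by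
  rw [PySem.List.pyRange_one_cons hab]
  simp [pvStepA, PySem.List.pyGet?, PySem.List.pyIdx?,
    PySem.List.remove?_cons_of_ne _ (show (0:Int) ≠ a by omega)]

-- the last A-step: pool = [0]
theorem pvStepA_last (acc : List Int) :
    pvStepA ([0], acc) = ([], acc ++ [0]) := by
  simp [pvStepA, PySem.List.pyGet?, PySem.List.pyIdx?]

-- m mid-steps in a row
theorem pvStepA_run (m : Nat) (a b : Int) (h0 : 0 < a) (hm : a + m ≤ b) (acc : List Int) :
    pvStepA^[m] (0 :: PySem.List.pyRange a b 1, acc)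
      = (0 :: PySem.List.pyRange (a + m) b 1, acc ++ PySem.List.pyRange a (a + m) 1) := by
  induction m generalizing a acc with
  | zero => simp [PySem.List.pyRange_one_eq_nil (le_refl a)]
  | succ k ih =>
    rw [Function.iterate_succ_apply, pvStepA_mid a b h0 (by push_cast at hm ⊢; omega),
      ih (a + 1) (by omega) (by push_cast at hm ⊢; omega)]
    rw [PySem.List.pyRange_one_cons (show a < a + ((k + 1 : Nat) : Int) by push_cast; omega)]
    push_cast
    rw [show a + 1 + (k : Int) = a + ((k : Int) + 1) by ring]
    simp

-- a full inner row of s steps from a pool of exactly s entries (0 last)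
theorem pv_innerA_last (s : Nat) (a b : Int) (h0 : 0 < a) (hs : a + (s : Int) = b + 1)
    (hab : a ≤ b) :
    pvStepA^[s] (0 :: PySem.List.pyRange a b 1, []) = ([], PySem.List.pyRange a b 1 ++ [0]) := by
  obtain ⟨k, rfl⟩ : ∃ k, s = k + 1 := ⟨s - 1, by omega⟩
  rw [Function.iterate_succ_apply', pvStepA_run k a b h0 (by push_cast at hs; omega)]
  have : a + (k : Int) = b := by push_cast at hs; omega
  rw [this, PySem.List.pyRange_one_eq_nil (le_refl b), pvStepA_last]
  simp

-- a full inner row of s steps with more than s entries left in the pool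
theorem pv_innerA_mid (s : Nat) (a b : Int) (h0 : 0 < a) (hs : a + (s : Int) ≤ b) :
    pvStepA^[s] (0 :: PySem.List.pyRange a b 1, [])
      = (0 :: PySem.List.pyRange (a + s) b 1, PySem.List.pyRange a (a + s) 1) := by
  simpa using pvStepA_run s a b h0 hs []

-- the common closed form of both grids, for size = s ≥ 1
def pvGrid (s : Nat) : List (List Int) :=
  (List.range (s - 1)).map (fun (r : Nat) => PySem.List.pyRange ((r : Int) * s + 1) ((r : Int) * s + s + 1) 1)
    ++ [PySem.List.pyRange (((s : Int) - 1) * s + 1) ((s : Int) * s) 1 ++ [0]]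

theorem pv_outer_run (s : Nat) (i : Nat) (hi : i < s) :
    (pvOuterA (s : Int))^[i] (0 :: PySem.List.pyRange 1 ((s : Int) * s) 1, [])
      = (0 :: PySem.List.pyRange ((i : Int) * s + 1) ((s : Int) * s) 1,
         (List.range i).map (fun (r : Nat) => PySem.List.pyRange ((r : Int) * s + 1) ((r : Int) * s + s + 1) 1)) := by
  induction i with
  | zero => simp
  | succ k ih =>
    rw [Function.iterate_succ_apply', ih (by omega)]
    have hlen : (PySem.List.pyRange 0 (s : Int) 1).length = s := by
      simp [PySem.List.length_pyRange_one]
    have hks : (k : Int) + 1 + 1 ≤ (s : Int) := by omega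
    have hmid : ((k : Int) * s + 1) + (s : Int) ≤ (s : Int) * s := by
      nlinarith [Int.natCast_nonneg s, Int.natCast_nonneg k]
    simp only [pvOuterA, pv_foldl_const pvStepA, hlen]
    rw [pv_innerA_mid s ((k : Int) * s + 1) ((s : Int) * s) (by positivity) hmid]
    have e2 : (k : Int) * s + 1 + (s : Int) = (k : Int) * s + s + 1 := by ring
    have e1 : ((k + 1 : Nat) : Int) * s + 1 = (k : Int) * s + s + 1 := by push_cast; ring
    rw [List.range_succ]
    simp only [List.map_append, List.map_cons, List.map_nil, e1, e2]

theorem pv_A_eq (s : Nat) (hs : 1 ≤ s) : generate_default_grid (s : Int) = pvGrid s := by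
  have hs0 : (0 : Int) < (s : Int) := by omega
  have hn : (0 : Int) < (s : Int) * s := mul_pos hs0 hs0
  have hlen : (PySem.List.pyRange 0 (s : Int) 1).length = s := by
    simp [PySem.List.length_pyRange_one]
  show ((PySem.List.pyRange 0 ((s : Int) * s) 1, ([] : List (List Int))) |>
      (PySem.List.pyRange 0 (s : Int) 1).foldl (fun st _ => pvOuterA (s : Int) st)).2 = pvGrid s
  rw [pv_foldl_const (pvOuterA (s : Int)), hlen, PySem.List.pyRange_one_cons hn, zero_add]
  obtain ⟨m, rfl⟩ : ∃ m, s = m + 1 := ⟨s - 1, by omega⟩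
  rw [Function.iterate_succ_apply', pv_outer_run (m + 1) m (by omega)]
  have hlen2 : (PySem.List.pyRange 0 ((m + 1 : Nat) : Int) 1).length = m + 1 := by
    simp [PySem.List.length_pyRange_one]
  simp only [pvOuterA, pv_foldl_const pvStepA, hlen2]
  rw [pv_innerA_last (m + 1) ((m : Int) * ((m + 1 : Nat) : Int) + 1)
    (((m + 1 : Nat) : Int) * ((m + 1 : Nat) : Int))
    (by positivity) (by push_cast; ring)
    (by push_cast; nlinarith [Int.natCast_nonneg m])]
  unfold pvGrid
  simp only [Nat.add_sub_cancel]
  congr 3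
  push_cast
  ring_nf

-- one row of B, in closed form
theorem pv_rowB (s : Nat) (i : Nat) (hi : i < s) :
    (PySem.List.pyRange 0 (s : Int) 1).map
        (fun j => PySem.Int.mod ((i : Int) * s + j + 1) ((s : Int) * s))
      = (if i + 1 < s then PySem.List.pyRange ((i : Int) * s + 1) ((i : Int) * s + s + 1) 1
         else PySem.List.pyRange (((s : Int) - 1) * s + 1) ((s : Int) * s) 1 ++ [0]) := by
  have hs0 : (0 : Int) < (s : Int) := by omega
  have hn : (0 : Int) < (s : Int) * s := mul_pos hs0 hs0
  have hmod : ∀ k : Nat, k < s → (i + 1 < s ∨ k + 1 < s) →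
      PySem.Int.mod ((i : Int) * s + k + 1) ((s : Int) * s) = (i : Int) * s + k + 1 := by
    intro k hk hor
    rw [PySem.Int.mod_eq_emod_of_pos hn, Int.emod_eq_of_lt (by positivity)]
    rcases hor with h | h
    · have h1 : (i : Int) + 1 + 1 ≤ (s : Int) := by omega
      have h2 : (k : Int) + 1 ≤ (s : Int) := by omega
      nlinarith [Int.natCast_nonneg k]
    · have h1 : (i : Int) + 1 ≤ (s : Int) := by omega
      have h2 : (k : Int) + 1 + 1 ≤ (s : Int) := by omega
      nlinarith [Int.natCast_nonneg i]
  by_cases hlast : i + 1 < s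
  · rw [if_pos hlast, PySem.List.pyRange_one 0 (s : Int),
      PySem.List.pyRange_one ((i : Int) * s + 1) ((i : Int) * s + s + 1)]
    rw [show ((i : Int) * s + s + 1 - ((i : Int) * s + 1)).toNat = s by omega]
    simp only [Int.sub_zero, Int.toNat_natCast, List.map_map]
    refine List.map_congr_left (fun k hk => ?_)
    have hk' : k < s := List.mem_range.mp hk
    simp only [Function.comp_apply, zero_add]
    rw [hmod k hk' (Or.inl hlast)]
    ring
  · rw [if_neg hlast]
    obtain rfl : s = i + 1 := by omega
    rw [PySem.List.pyRange_one 0 ((i + 1 : Nat) : Int),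
      PySem.List.pyRange_one ((((i + 1 : Nat) : Int) - 1) * ((i + 1 : Nat) : Int) + 1)
        (((i + 1 : Nat) : Int) * ((i + 1 : Nat) : Int))]
    rw [show (((i + 1 : Nat) : Int) * ((i + 1 : Nat) : Int)
          - ((((i + 1 : Nat) : Int) - 1) * ((i + 1 : Nat) : Int) + 1)) = ((i : Nat) : Int) by
        push_cast
        ring_nf]
    simp only [Int.sub_zero, Int.toNat_natCast, List.map_map]
    rw [List.range_succ]
    simp only [List.map_append, List.map_cons, List.map_nil, Function.comp_apply, zero_add]
    congr 1
    · refine List.map_congr_left (fun k hk => ?_)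
      have hk' : k < i := List.mem_range.mp hk
      simp only [Function.comp_apply]
      rw [hmod k (by omega) (Or.inr (by omega))]
      push_cast
      ring
    · rw [show ((i : Int)) * ((i + 1 : Nat) : Int) + (i : Int) + 1
            = ((i + 1 : Nat) : Int) * ((i + 1 : Nat) : Int) by push_cast; ring,
        PySem.Int.mod_eq_emod_of_pos hn, Int.emod_self]

theorem pv_B_eq (s : Nat) (hs : 1 ≤ s) : generate_default_grid_alt (s : Int) = pvGrid s := by
  obtain ⟨m, rfl⟩ : ∃ m, s = m + 1 := ⟨s - 1, by omega⟩
  have hG : ∀ x ∈ PySem.List.pyRange 0 ((m + 1 : Nat) : Int) 1,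
      (PySem.List.pyRange 0 ((m + 1 : Nat) : Int) 1).map
          (fun j => PySem.Int.mod (x * ((m + 1 : Nat) : Int) + j + 1)
            (((m + 1 : Nat) : Int) * ((m + 1 : Nat) : Int)))
        = (if x + 1 < ((m + 1 : Nat) : Int) then
             PySem.List.pyRange (x * ((m + 1 : Nat) : Int) + 1)
               (x * ((m + 1 : Nat) : Int) + ((m + 1 : Nat) : Int) + 1) 1
           else
             PySem.List.pyRange ((((m + 1 : Nat) : Int) - 1) * ((m + 1 : Nat) : Int) + 1)
               (((m + 1 : Nat) : Int) * ((m + 1 : Nat) : Int)) 1 ++ [0]) := by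
    intro x hx
    rw [PySem.List.mem_pyRange_one] at hx
    obtain ⟨k, rfl⟩ : ∃ k : Nat, x = (k : Int) := ⟨x.toNat, by omega⟩
    have hk : k < m + 1 := by omega
    rw [pv_rowB (m + 1) k hk]
    by_cases h : k + 1 < m + 1
    · rw [if_pos h, if_pos (by omega : (k : Int) + 1 < ((m + 1 : Nat) : Int))]
    · rw [if_neg h, if_neg (by omega : ¬ ((k : Int) + 1 < ((m + 1 : Nat) : Int)))]
  show (PySem.List.pyRange 0 ((m + 1 : Nat) : Int) 1).map (fun x =>
      (PySem.List.pyRange 0 ((m + 1 : Nat) : Int) 1).map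
        (fun j => PySem.Int.mod (x * ((m + 1 : Nat) : Int) + j + 1)
          (((m + 1 : Nat) : Int) * ((m + 1 : Nat) : Int)))) = pvGrid (m + 1)
  rw [List.map_congr_left hG, PySem.List.pyRange_one 0 ((m + 1 : Nat) : Int)]
  simp only [Int.sub_zero, Int.toNat_natCast, List.map_map]
  rw [List.range_succ]
  simp only [List.map_append, List.map_cons, List.map_nil, Function.comp_apply, zero_add]
  unfold pvGrid
  simp only [Nat.add_sub_cancel]
  congr 1
  · refine List.map_congr_left (fun k hk => ?_)
    have hk' : k < m := List.mem_range.mp hk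
    simp only [Function.comp_apply]
    rw [if_pos (by omega : (k : Int) + 1 < ((m + 1 : Nat) : Int))]
  · rw [if_neg (by omega : ¬ ((m : Int) + 1 < ((m + 1 : Nat) : Int)))]

-- ===== VERDICT (by name: the statement is the Claim_ definition above) =====
theorem generate_default_grid_spec : Claim_equal_generate_default_grid := by
  intro size _
  unfold Spec_generate_default_grid
  by_cases hpos : 0 < size
  · lift size to Nat using le_of_lt hpos with s
    rw [pv_A_eq s (by omega), pv_B_eq s (by omega)]
  · have h0 : PySem.List.pyRange 0 size 1 = [] := PySem.List.pyRange_one_eq_nil (by omega)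
    simp [generate_default_grid, generate_default_grid_alt, h0]
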